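-- pv_equiv track=rewrite | github.com/Hoseung/fase2 | fase/nn/conv.py | strided_indices
-- ===== SOURCE A (Python) =====
-- def strided_indices(nx, ny, strx, stry):
--     """return indices of valid pixels in a strided ctxt img.
--
--
--     example
--     -------
--     if nx = 8, ny = 8, and strride = 2,
--     valid pixels are:
--
--     1 0 1 0 1 0 1 0
--     0 0 0 0 0 0 0 0
--     1 0 1 0 1 0 1 0
--     0 0 0 0 0 0 0 0
--     1 0 1 0 1 0 1 0
--     0 0 0 0 0 0 0 0
--     1 0 1 0 1 0 1 0
--     0 0 0 0 0 0 0 0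
--
--     or in a ctxt,
--
--     1 0 1 0 1 0 1 0, 0 0 0 0 0 0 0 0, 1 0 1 0 1 0 1 0, ...
--
--     then the function returns
--
--     [0,2,4,6,16,18,20, ...]
--
--     """
--     # valid image
--     nx_v = int(nx/strx)
--     ny_v = int(ny/stry)
--
--     valid_inds = []
--     for i in range(nx_v):
--         for j in range(ny_v):
--             valid_inds.append(nx*i*strx + stry*j)
--     return valid_inds
-- ===== SOURCE B (Python) =====
-- def strided_indices(nx, ny, strx, stry):
--     """Single flat loop: index k over the valid-pixel count, with divmod
--     recovering the (row, column) pair instead of two nested loops."""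
--     nx_v = int(nx / strx)
--     ny_v = int(ny / stry)
--     if nx_v <= 0 or ny_v <= 0:
--         return []
--     step = nx * strx
--     out = []
--     for k in range(nx_v * ny_v):
--         i, j = divmod(k, ny_v)
--         out.append(step * i + stry * j)
--     return out
-- ===== Notes on version B (the rewrite author's own statement) =====
-- stated objective: alternative
-- what changed: Replaces the two nested loops with one flat loop over the total valid-pixel count, recovering (row, column) from the flat index via divmod.
import Mathlib
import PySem

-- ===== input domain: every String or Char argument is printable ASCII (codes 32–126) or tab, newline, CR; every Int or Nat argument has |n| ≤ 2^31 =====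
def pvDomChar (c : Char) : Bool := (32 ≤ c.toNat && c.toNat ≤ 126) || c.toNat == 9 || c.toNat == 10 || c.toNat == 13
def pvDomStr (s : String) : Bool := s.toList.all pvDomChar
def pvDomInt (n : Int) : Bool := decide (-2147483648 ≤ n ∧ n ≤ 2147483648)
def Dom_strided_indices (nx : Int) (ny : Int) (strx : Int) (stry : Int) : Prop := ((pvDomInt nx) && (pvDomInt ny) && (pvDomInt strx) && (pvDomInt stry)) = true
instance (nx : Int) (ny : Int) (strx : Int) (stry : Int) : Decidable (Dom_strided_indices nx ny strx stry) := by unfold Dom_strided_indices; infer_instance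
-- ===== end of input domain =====

-- B replaces A's two nested loops by one flat loop with divmod over the flat index; objective: alternative decomposition, same cost.

-- ===== PORT A =====
-- int(nx/strx) is float division then truncation toward zero; on |arguments| ≤ 2^31 the
-- float quotient rounds to an integer only when the division is exact, so it equals Int.tdiv (truncating division).
def strided_indices (nx : Int) (ny : Int) (strx : Int) (stry : Int) : List Int :=
  let nx_v := nx.tdiv strx
  let ny_v := ny.tdiv stry
  (PySem.List.pyRange 0 nx_v 1).foldl
    (fun acc i =>
      (PySem.List.pyRange 0 ny_v 1).foldl
        (fun acc2 j => acc2 ++ [nx * i * strx + stry * j]) acc)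
    []

-- ===== PORT B =====
def strided_indices_alt (nx : Int) (ny : Int) (strx : Int) (stry : Int) : List Int :=
  let nx_v := nx.tdiv strx
  let ny_v := ny.tdiv stry
  if nx_v ≤ 0 ∨ ny_v ≤ 0 then []
  else
    let step := nx * strx
    (PySem.List.pyRange 0 (nx_v * ny_v) 1).foldl
      (fun acc k => acc ++ [step * PySem.Int.floordiv k ny_v + stry * PySem.Int.mod k ny_v])
      []

-- ===== PRECONDITION & SPEC =====
-- Pre_ excludes exactly the inputs where Python A raises ZeroDivisionError.
def Pre_strided_indices (nx : Int) (ny : Int) (strx : Int) (stry : Int) : Prop := strx ≠ 0 ∧ stry ≠ 0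
instance (nx : Int) (ny : Int) (strx : Int) (stry : Int) : Decidable (Pre_strided_indices nx ny strx stry) := by unfold Pre_strided_indices; infer_instance
def pvWitness_strided_indices : Int × Int × Int × Int := (8, 8, 2, 2)

def Spec_strided_indices (nx : Int) (ny : Int) (strx : Int) (stry : Int) (out : List Int) : Prop := out = strided_indices_alt nx ny strx stry
instance (nx : Int) (ny : Int) (strx : Int) (stry : Int) (out : List Int) : Decidable (Spec_strided_indices nx ny strx stry out) := by unfold Spec_strided_indices; infer_instance

-- ===== CLAIM (what is proved, stated in full; the proofs are below) =====
def Claim_equal_strided_indices : Prop := ∀ (nx : Int) (ny : Int) (strx : Int) (stry : Int), Dom_strided_indices nx ny strx stry → Pre_strided_indices nx ny strx stry → Spec_strided_indices nx ny strx stry (strided_indices nx ny strx stry)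

-- ===== LEMMAS AND PROOFS =====

-- A's nested append-loops are the row-major double comprehension.
lemma portA_flatMap (nx strx stry N M : Int) :
    (PySem.List.pyRange 0 N 1).foldl
      (fun acc i =>
        (PySem.List.pyRange 0 M 1).foldl
          (fun acc2 j => acc2 ++ [nx * i * strx + stry * j]) acc)
      []
    = (PySem.List.pyRange 0 N 1).flatMap
        (fun i => (PySem.List.pyRange 0 M 1).map (fun j => nx * i * strx + stry * j)) := by
  have h1 : (PySem.List.pyRange 0 N 1).foldl
      (fun acc i =>
        (PySem.List.pyRange 0 M 1).foldl
          (fun acc2 j => acc2 ++ [nx * i * strx + stry * j]) acc) []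
      = (PySem.List.pyRange 0 N 1).foldl
          (fun acc i => acc ++ (PySem.List.pyRange 0 M 1).map (fun j => nx * i * strx + stry * j)) [] := by
    apply PySem.List.foldl_congr_mem
    intro acc i _
    exact PySem.List.foldl_append_singleton_eq_map _ _ _
  rw [h1, PySem.List.foldl_append_eq_flatMap]
  simp

-- the divmod flattening, on Nat ranges
lemma range_mul_divmod (f : Nat → Nat → Int) (m : Nat) (hm : 0 < m) : ∀ (n : Nat),
    (List.range (n * m)).map (fun k => f (k / m) (k % m))
    = (List.range n).flatMap (fun i => (List.range m).map (fun j => f i j)) := by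
  intro n
  induction n with
  | zero => simp
  | succ n ih =>
    have hr : List.range ((n + 1) * m) = List.range (n * m) ++ (List.range m).map (fun j => n * m + j) := by
      rw [Nat.succ_mul, List.range_add]
    rw [hr, List.map_append, ih, List.range_succ, List.flatMap_append, List.map_map]
    congr 1
    simp only [List.flatMap_cons, List.flatMap_nil, List.append_nil]
    apply List.map_congr_left
    intro j hj
    have hjm : j < m := List.mem_range.mp hj
    have h1 : (n * m + j) / m = n := by
      rw [Nat.mul_comm, Nat.mul_add_div hm, Nat.div_eq_of_lt hjm]; omega
    have h2 : (n * m + j) % m = j := by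
      rw [Nat.mul_comm, Nat.mul_add_mod, Nat.mod_eq_of_lt hjm]
    simp [Function.comp, h1, h2]

-- ===== VERDICT =====
theorem strided_indices_spec : Claim_equal_strided_indices := by
  intro nx ny strx stry _ _
  unfold Spec_strided_indices strided_indices strided_indices_alt
  set N := nx.tdiv strx with hN
  set M := ny.tdiv stry with hM
  rw [portA_flatMap]
  by_cases hle : N ≤ 0 ∨ M ≤ 0
  · rw [if_pos hle]
    rcases hle with h | h
    · rw [show PySem.List.pyRange 0 N 1 = [] from PySem.List.pyRange_one_eq_nil (by omega)]
      simp
    · rw [show PySem.List.pyRange 0 M 1 = [] from PySem.List.pyRange_one_eq_nil (by omega)]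
      simp
  · rw [if_neg hle]
    push_neg at hle
    obtain ⟨hN0, hM0⟩ := hle
    have hMn : M = ((M.toNat : Nat) : Int) := by omega
    have hNn : N = ((N.toNat : Nat) : Int) := by omega
    have hprod : ((N * M).toNat) = N.toNat * M.toNat := by
      rw [show N * M = ((N.toNat * M.toNat : Nat) : Int) by push_cast; rw [← hNn, ← hMn],
          Int.toNat_natCast]
    rw [PySem.List.foldl_append_singleton_eq_map, List.nil_append,
        PySem.List.pyRange_one 0 (N * M), PySem.List.pyRange_one 0 N, PySem.List.pyRange_one 0 M]
    simp only [Int.sub_zero, zero_add, List.map_map, List.flatMap_map, Function.comp_def]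
    rw [hprod,
        ← range_mul_divmod (fun i j => nx * (i : Int) * strx + stry * (j : Int)) M.toNat (by omega) N.toNat]
    apply List.map_congr_left
    intro k _
    rw [hMn, PySem.Int.floordiv_natCast, PySem.Int.mod_natCast]
    simp only [Int.toNat_natCast]
    ring
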